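-- pv_equiv track=rewrite | github.com/katesybby/SCREENKISS | python scripts/check_titles.py | build_entry_duplicate_report
-- ===== SOURCE A (Python) =====
-- from collections import Counter, defaultdict
--
-- def build_entry_duplicate_report(entries: list[dict]) -> dict[str, list[dict]]:
--     groups = defaultdict(list)
--     for entry in entries:
--         groups[entry["normalized_title"]].append(entry)
--
--     return {
--         norm: grouped
--         for norm, grouped in groups.items()
--         if norm and len(grouped) > 1
--     }
-- ===== SOURCE B (Python) =====
-- def build_entry_duplicate_report(entries: list[dict]) -> dict[str, list[dict]]:
--     # first-appearance-ordered list of distinct titles, then a nested scan per title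
--     seen = []
--     for entry in entries:
--         t = entry["normalized_title"]
--         if t not in seen:
--             seen.append(t)
--     report = {}
--     for t in seen:
--         if t:
--             group = [e for e in entries if e["normalized_title"] == t]
--             if len(group) > 1:
--                 report[t] = group
--     return report
-- ===== Notes on version B (the rewrite author's own statement) =====
-- stated objective: alternative
-- what changed: A builds one hash-grouped dict in a single pass and filters its groups; B first collects the distinct titles in first-appearance order and then rebuilds each qualifying group by a fresh scan of the entries, with no grouping dict at all (trades O(n) hashing for an O(n*k) nested scan).
import Mathlib
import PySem

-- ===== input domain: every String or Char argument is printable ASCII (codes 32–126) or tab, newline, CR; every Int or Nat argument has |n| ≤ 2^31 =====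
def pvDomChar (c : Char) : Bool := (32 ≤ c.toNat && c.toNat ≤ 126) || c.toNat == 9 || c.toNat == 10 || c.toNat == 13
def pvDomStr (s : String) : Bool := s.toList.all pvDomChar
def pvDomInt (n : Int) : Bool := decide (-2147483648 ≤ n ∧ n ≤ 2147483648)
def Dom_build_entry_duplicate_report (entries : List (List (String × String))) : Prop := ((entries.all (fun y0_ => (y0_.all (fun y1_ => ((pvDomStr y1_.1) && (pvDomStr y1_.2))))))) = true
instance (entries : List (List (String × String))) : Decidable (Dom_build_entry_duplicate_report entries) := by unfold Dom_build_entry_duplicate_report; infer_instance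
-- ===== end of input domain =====

-- B replaces A's hash-grouping dict with "collect distinct titles in first-appearance order, then
-- rebuild each qualifying group by a fresh scan of the entries" (objective: alternative, not faster).

-- shared helper: entry["normalized_title"] — first-match lookup in the entry's association list
-- (Pre_ guarantees the key is present, so the "" default is never used on admitted inputs)
def pvTitle (e : List (String × String)) : String :=
  (((e.find? (fun p => p.1 == "normalized_title")).map (fun p => p.2)).getD "")

-- ===== PORT A =====
def build_entry_duplicate_report (entries : List (List (String × String))) : List (String × List (List (String × String))) :=
  let groups := entries.foldl (fun d e => d.modify (pvTitle e) [] (fun g => g ++ [e])) PySem.Dict.empty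
  groups.items.filter (fun p => decide (p.1 ≠ "") && decide (p.2.length > 1))

-- ===== PORT B =====
-- 'if t not in seen: seen.append(t)' is the set-building loop PySem.Set.add; the report dict is
-- keyed by the distinct 'seen' titles, so each assignment report[t] = group appends a fresh pair.
def build_entry_duplicate_report_alt (entries : List (List (String × String))) : List (String × List (List (String × String))) :=
  let seen := entries.foldl (fun s e => PySem.Set.add s (pvTitle e)) (PySem.Set.ofList [])
  seen.foldl (fun report t =>
    if t ≠ "" then
      let group := entries.filter (fun e => pvTitle e == t)
      if group.length > 1 then report ++ [(t, group)] else report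
    else report) []

-- ===== PRECONDITION & SPEC =====
-- Pre_ excludes exactly the entries missing the "normalized_title" key, on which Python A raises KeyError.
def Pre_build_entry_duplicate_report (entries : List (List (String × String))) : Prop :=
  ∀ e ∈ entries, "normalized_title" ∈ e.map Prod.fst
instance (entries : List (List (String × String))) : Decidable (Pre_build_entry_duplicate_report entries) := by unfold Pre_build_entry_duplicate_report; infer_instance
def pvWitness_build_entry_duplicate_report : (List (List (String × String))) :=
  [[("normalized_title", "dup"), ("url", "u1")], [("normalized_title", "dup"), ("url", "u2")], [("normalized_title", "solo")]]

def Spec_build_entry_duplicate_report (entries : List (List (String × String))) (out : List (String × List (List (String × String)))) : Prop := out = build_entry_duplicate_report_alt entries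
instance (entries : List (List (String × String))) (out : List (String × List (List (String × String)))) : Decidable (Spec_build_entry_duplicate_report entries out) := by unfold Spec_build_entry_duplicate_report; infer_instance

-- ===== CLAIM (what is proved, stated in full; the proofs are below) =====
def Claim_equal_build_entry_duplicate_report : Prop := ∀ (entries : List (List (String × String))), Dom_build_entry_duplicate_report entries → Pre_build_entry_duplicate_report entries → Spec_build_entry_duplicate_report entries (build_entry_duplicate_report entries)

-- ===== LEMMAS AND PROOFS =====

-- the grouping fold A performs, and the group each key ends up with
def pvGroup (l : List (List (String × String))) : PySem.Dict String (List (List (String × String))) :=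
  l.foldl (fun d e => d.modify (pvTitle e) [] (fun g => g ++ [e])) PySem.Dict.empty

lemma pvGroup_keys (l : List (List (String × String))) :
    (pvGroup l).keys = PySem.Set.ofList (l.map pvTitle) := by
  unfold pvGroup
  rw [PySem.Dict.keys_foldl_modify_key l pvTitle [] (fun _ e => fun g => g ++ [e])]
  simp only [PySem.Dict.keys_empty]
  exact PySem.Set.update_nil_left _

lemma pvGroup_keys_nodup (l : List (List (String × String))) : (pvGroup l).keys.Nodup := by
  unfold pvGroup
  exact PySem.Dict.nodup_keys_foldl_modify_key l pvTitle [] (fun _ e => fun g => g ++ [e]) _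
    (by simp [PySem.Dict.keys_empty])

lemma pvGroup_getD (l : List (List (String × String))) (t : String) :
    (pvGroup l).getD t [] = l.filter (fun e => pvTitle e == t) := by
  unfold pvGroup
  have h := PySem.Dict.getD_foldl_modify_append (l.map (fun e => (pvTitle e, e))) PySem.Dict.empty t
  rw [List.foldl_map] at h
  simpa [PySem.Dict.getD_empty, List.filter_map, Function.comp_def] using h

lemma pvGroup_items (l : List (List (String × String))) :
    (pvGroup l).items
      = (PySem.Set.ofList (l.map pvTitle)).map (fun t => (t, l.filter (fun e => pvTitle e == t))) := by
  rw [PySem.Dict.items_eq_map_keys _ (pvGroup_keys_nodup l) [], pvGroup_keys]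
  exact List.map_congr_left (fun t _ => by rw [pvGroup_getD])

-- B's 'seen' loop builds exactly the distinct-title set in first-appearance order
lemma pvSeen_eq (entries : List (List (String × String))) :
    entries.foldl (fun s e => PySem.Set.add s (pvTitle e)) (PySem.Set.ofList [])
      = PySem.Set.ofList (entries.map pvTitle) := by
  rw [← PySem.Set.update_map_eq_foldl_add]
  simp [PySem.Set.ofList_nil, PySem.Set.update_nil_left]

-- ===== VERDICT (by name: the statement is the Claim_ definition above) =====

theorem build_entry_duplicate_report_spec : Claim_equal_build_entry_duplicate_report := by
  intro entries _ _
  unfold Spec_build_entry_duplicate_report build_entry_duplicate_report build_entry_duplicate_report_alt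
  simp only
  rw [pvSeen_eq]
  rw [show (entries.foldl (fun d e => d.modify (pvTitle e) [] (fun g => g ++ [e])) PySem.Dict.empty) = pvGroup entries from rfl]
  rw [pvGroup_items, List.filter_map]
  have hfold :
      (PySem.Set.ofList (entries.map pvTitle)).foldl (fun report t =>
          if t ≠ "" then
            let group := entries.filter (fun e => pvTitle e == t)
            if group.length > 1 then report ++ [(t, group)] else report
          else report) []
        = ([] : List (String × List (List (String × String)))) ++
          ((PySem.Set.ofList (entries.map pvTitle)).filter
              (fun t => decide (t ≠ "") && decide ((entries.filter (fun e => pvTitle e == t)).length > 1))).map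
            (fun t => (t, entries.filter (fun e => pvTitle e == t))) := by
    rw [← PySem.List.foldl_append_if
      (fun t => decide (t ≠ "") && decide ((entries.filter (fun e => pvTitle e == t)).length > 1))
      (fun t => (t, entries.filter (fun e => pvTitle e == t)))]
    apply PySem.List.foldl_congr_mem
    intro r t _
    by_cases h1 : t = "" <;> by_cases h2 : (entries.filter (fun e => pvTitle e == t)).length > 1 <;>
      simp [h1, h2]
  rw [hfold, List.nil_append]
  congr 1
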